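-- pv_equiv track=rewrite | github.com/RuslanGik/lesson4 | Lesson4UsefulTools4.py | filter_generator
-- ===== SOURCE A (Python) =====
-- def filter_generator(arr):
--     dict_ = {}
--     for a in arr:
--         if a in dict_:
--             dict_[a] += 1
--         else:
--             dict_[a] = 1
--     filtered = [k for k in dict_ if dict_[k] == 1]
--     for f in filtered:
--         yield f
-- ===== SOURCE B (Python) =====
-- def filter_generator(arr):
--     uniq = []        # candidates seen exactly once so far, in first-occurrence order
--     dups = set()     # values seen at least twice
--     for x in arr:
--         if x in dups:
--             continue
--         if x in uniq:
--             uniq.remove(x)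
--             dups.add(x)
--         else:
--             uniq.append(x)
--     yield from uniq
-- ===== Notes on version B (the rewrite author's own statement) =====
-- stated objective: alternative
-- what changed: Replaces A's two-phase count-everything-into-a-dict-then-filter-keys with a single pass that keeps a candidate list and a seen-twice set: a first occurrence is appended as a candidate, a second occurrence removes the candidate and marks the value, later occurrences are skipped; no frequency counts are computed.
import Mathlib
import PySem

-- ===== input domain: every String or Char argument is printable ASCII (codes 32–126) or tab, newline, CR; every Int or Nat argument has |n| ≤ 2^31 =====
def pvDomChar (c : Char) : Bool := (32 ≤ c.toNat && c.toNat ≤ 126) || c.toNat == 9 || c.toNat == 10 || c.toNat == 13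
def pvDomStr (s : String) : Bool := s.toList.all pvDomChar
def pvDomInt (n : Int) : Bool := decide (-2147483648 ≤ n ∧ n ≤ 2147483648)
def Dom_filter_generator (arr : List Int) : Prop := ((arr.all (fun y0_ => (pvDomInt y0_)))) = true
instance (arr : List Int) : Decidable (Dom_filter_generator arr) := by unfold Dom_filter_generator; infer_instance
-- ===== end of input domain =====

-- B replaces A's build-a-frequency-dict-then-filter-its-keys algorithm with a single pass that
-- keeps a candidate list (first occurrences seen exactly once so far) and a seen-twice set,
-- removing a candidate on its second occurrence; no counts are computed. Objective: alternative.

-- ===== PORT A =====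
def filter_generator (arr : List Int) : List Int :=
  let dict_ := arr.foldl (fun d a =>
      if d.contains a then d.insert a (d.getD a 0 + 1) else d.insert a 1)
    (PySem.Dict.empty : PySem.Dict Int Int)
  let filtered := dict_.keys.filter (fun k => dict_.getD k 0 == 1)
  filtered

-- ===== PORT B =====
-- loop body of B: skip if x seen twice already; drop the candidate (uniq.remove(x)) and mark
-- x seen-twice on its second occurrence; otherwise append x as a candidate.
def fgStep (st : List Int × PySem.Set Int) (x : Int) : List Int × PySem.Set Int :=
  if st.2.contains x then st
  else if st.1.contains x then ((PySem.List.remove? st.1 x).getD st.1, st.2.add x)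
  else (st.1 ++ [x], st.2)

def filter_generator_alt (arr : List Int) : List Int :=
  (arr.foldl fgStep ([], PySem.Set.empty)).1

-- ===== PRECONDITION & SPEC =====
def Spec_filter_generator (arr : List Int) (out : List Int) : Prop := out = filter_generator_alt arr
instance (arr : List Int) (out : List Int) : Decidable (Spec_filter_generator arr out) := by unfold Spec_filter_generator; infer_instance

-- ===== CLAIM (what is proved, stated in full; the proofs are below) =====
def Claim_equal_filter_generator : Prop := ∀ (arr : List Int), Dom_filter_generator arr → Spec_filter_generator arr (filter_generator arr)

-- ===== LEMMAS AND PROOFS =====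

-- A's counting loop is Counter(arr): the not-yet-present branch inserts 1 = getD+1.
theorem pv_fold_eq_counter (arr : List Int) :
    arr.foldl (fun d a =>
        if d.contains a then d.insert a (d.getD a 0 + 1) else d.insert a 1)
      (PySem.Dict.empty : PySem.Dict Int Int)
    = PySem.Dict.counter arr := by
  rw [← PySem.Dict.foldl_insert_getD_add_one_eq_counter]
  apply PySem.List.foldl_congr_mem
  intro d a _
  by_cases h : d.contains a
  · simp [h]
  · rw [PySem.Dict.getD_of_not_contains _ _ (by simpa using h)]
    simp [h]

theorem pv_ofList_append (l : List Int) (x : Int) :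
    PySem.Set.ofList (l ++ [x]) = PySem.Set.add (PySem.Set.ofList l) x := by
  rw [PySem.Set.ofList_eq_foldl, PySem.Set.ofList_eq_foldl, List.foldl_append]
  rfl

theorem pv_remove?_of_mem (xs : List Int) (x : Int) (h : x ∈ xs) :
    PySem.List.remove? xs x = some (xs.erase x) := by
  rw [List.erase_eq_eraseIdx]
  unfold PySem.List.remove?
  cases hidx : List.idxOf? x xs with
  | none =>
    exfalso
    simp only [List.idxOf?_eq_none_iff] at hidx
    exact hidx h
  | some i => simp

-- loop invariant for B's fold: the candidate list is exactly the distinct elements (first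
-- occurrences, in order) occurring once in the prefix, and the set holds those seen at least twice.
theorem pv_loop_inv (l : List Int) :
    (l.foldl fgStep ([], PySem.Set.empty)).1
      = (PySem.Set.ofList l).filter (fun k => List.count k l == 1)
    ∧ ∀ y : Int, ((l.foldl fgStep ([], PySem.Set.empty)).2.contains y = true ↔ 2 ≤ List.count y l) := by
  induction l using List.reverseRecOn with
  | nil => exact ⟨rfl, by intro y; simp [PySem.Set.empty, PySem.Set.contains]⟩
  | append_singleton l x ih =>
    obtain ⟨h1, h2⟩ := ih
    rw [List.foldl_append]
    simp only [List.foldl_cons, List.foldl_nil]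
    set st := l.foldl fgStep ([], PySem.Set.empty) with hst
    unfold fgStep
    by_cases hd : st.2.contains x = true
    · -- x already seen at least twice: state unchanged
      have hc : 2 ≤ List.count x l := (h2 x).mp hd
      have hxl : x ∈ l := List.count_pos_iff.mp (by omega)
      have hxS : x ∈ PySem.Set.ofList l := (PySem.Set.mem_ofList l x).mpr hxl
      have hadd : PySem.Set.add (PySem.Set.ofList l) x = PySem.Set.ofList l := by
        simp [PySem.Set.add, PySem.Set.contains, hxS]
      refine ⟨?_, ?_⟩
      · rw [if_pos hd, pv_ofList_append, hadd, h1]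
        apply List.filter_congr
        intro y hy
        rw [Bool.eq_iff_iff]
        simp only [List.count_append, beq_iff_eq]
        by_cases hyx : y = x
        · subst hyx; simp; omega
        · simp [Ne.symm hyx]
      · intro y
        rw [if_pos hd, h2 y, List.count_append]
        by_cases hyx : y = x
        · subst hyx
          have hb : List.count y [y] = 1 := by simp
          omega
        · have hb : List.count y [x] = 0 := by simp [Ne.symm hyx]
          omega
    · -- x not seen twice yet
      rw [if_neg hd]
      have hd' : ¬ 2 ≤ List.count x l := fun h => hd ((h2 x).mpr h)
      by_cases hu : st.1.contains x = true
      · -- second occurrence: remove candidate, mark seen-twice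
        have hxmem : x ∈ st.1 := List.contains_iff_mem.mp hu
        have hxfil : x ∈ (PySem.Set.ofList l).filter (fun k => List.count k l == 1) := h1 ▸ hxmem
        have hc1 : List.count x l = 1 := by
          have := (List.mem_filter.mp hxfil).2
          simpa using this
        have hxS : x ∈ PySem.Set.ofList l :=
          (List.mem_filter.mp hxfil).1
        have hadd : PySem.Set.add (PySem.Set.ofList l) x = PySem.Set.ofList l := by
          simp [PySem.Set.add, PySem.Set.contains, hxS]
        have hnd : st.1.Nodup := h1 ▸ (PySem.Set.nodup_ofList l).filter _
        refine ⟨?_, ?_⟩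
        · rw [if_pos hu, pv_remove?_of_mem st.1 x hxmem]
          show st.1.erase x = _
          rw [hnd.erase_eq_filter, h1, List.filter_filter, pv_ofList_append, hadd]
          apply List.filter_congr
          intro y hy
          rw [Bool.eq_iff_iff]
          simp only [List.count_append, beq_iff_eq, Bool.and_eq_true, bne_iff_ne]
          by_cases hyx : y = x
          · subst hyx
            have hb : List.count y [y] = 1 := by simp
            omega
          · have hb : List.count y [x] = 0 := by simp [Ne.symm hyx]
            omega
        · intro y
          rw [if_pos hu]
          show (st.2.add x).contains y = true ↔ _
          rw [List.count_append]
          have : (st.2.add x).contains y = true ↔ y ∈ st.2 ∨ y = x := by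
            rw [PySem.Set.contains, List.contains_iff_mem, PySem.Set.mem_add]
          rw [this]
          by_cases hyx : y = x
          · subst hyx
            simp [hc1]
          · have hmem : (y ∈ st.2) ↔ 2 ≤ List.count y l := by
              rw [← h2 y, PySem.Set.contains, List.contains_iff_mem]
            simp [hyx, Ne.symm hyx, hmem]
      · -- first occurrence: append candidate
        have hxnot : x ∉ st.1 := fun h => hu (List.contains_iff_mem.mpr h)
        have hc0 : List.count x l = 0 := by
          rcases Nat.lt_or_ge (List.count x l) 1 with h | h
          · omega
          · rcases Nat.lt_or_ge (List.count x l) 2 with h' | h'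
            · exfalso
              have hc1 : List.count x l = 1 := by omega
              have hxl : x ∈ l := List.count_pos_iff.mp (by omega)
              apply hxnot
              rw [h1]
              exact List.mem_filter.mpr ⟨(PySem.Set.mem_ofList l x).mpr hxl, by simp [hc1]⟩
            · exact absurd h' hd'
        have hxl : x ∉ l := by
          intro h; have := List.count_pos_iff.mpr h; omega
        have hadd : PySem.Set.add (PySem.Set.ofList l) x = PySem.Set.ofList l ++ [x] := by
          simp only [PySem.Set.add, PySem.Set.contains]
          rw [if_neg]
          simp [PySem.Set.mem_ofList, hxl]
        refine ⟨?_, ?_⟩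
        · rw [if_neg hu, pv_ofList_append, hadd, List.filter_append]
          show st.1 ++ [x] = _
          congr 1
          · rw [h1]
            apply List.filter_congr
            intro y hy
            have hyl : y ∈ l := (PySem.Set.mem_ofList l y).mp hy
            have hyx : y ≠ x := fun h => hxl (h ▸ hyl)
            rw [Bool.eq_iff_iff]
            simp only [List.count_append, beq_iff_eq]
            simp [Ne.symm hyx]
          · simp [List.count_append, List.count_singleton, hc0]
        · intro y
          rw [if_neg hu, h2 y, List.count_append]
          by_cases hyx : y = x
          · subst hyx
            have hb : List.count y [y] = 1 := by simp
            omega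
          · have hb : List.count y [x] = 0 := by simp [Ne.symm hyx]
            omega

theorem pv_beq_cast (n : Nat) : (((n : Int)) == (1 : Int)) = (n == 1) := by
  by_cases h : n = 1 <;> simp [h]

theorem filter_generator_eq (arr : List Int) :
    filter_generator arr = filter_generator_alt arr := by
  unfold filter_generator filter_generator_alt
  dsimp only
  rw [pv_fold_eq_counter, PySem.Dict.keys_counter, (pv_loop_inv arr).1]
  apply List.filter_congr
  intro k _
  rw [PySem.Dict.getD_counter, pv_beq_cast]

-- ===== VERDICT (by name: the statement is the Claim_ definition above) =====
theorem filter_generator_spec : Claim_equal_filter_generator := by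
  intro arr _
  exact filter_generator_eq arr
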